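-- pv_equiv track=rewrite | github.com/XduSyL/EventChat | data_process/Extract_tracks.py | convert_numbers_to_unique_classes_string
-- ===== SOURCE A (Python) =====
-- def convert_numbers_to_unique_classes_string(numbers):
--     # 定义类别映射
--     class_map = {
--         0: 'pedestrian',
--         1: 'rider',
--         2: 'car',
--         3: 'bus',
--         4: 'truck',
--         5: 'bicycle',
--         6: 'motorcycle',
--         7: 'train'
--     }
--
--     # 使用列表和一个辅助集合来保持顺序并去重
--     seen = set()
--     unique_classes = []
--     for number in numbers:
--         class_name = class_map.get(number, 'unknown')
--         if class_name not in seen: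
--             seen.add(class_name)
--             unique_classes.append(class_name)
--
--     # 将列表转换为逗号分隔的字符串
--     return ', '.join(unique_classes)
-- ===== SOURCE B (Python) =====
-- def convert_numbers_to_unique_classes_string(numbers):
--     class_map = {
--         0: 'pedestrian',
--         1: 'rider',
--         2: 'car',
--         3: 'bus',
--         4: 'truck',
--         5: 'bicycle',
--         6: 'motorcycle',
--         7: 'train'
--     }
--
--     def name(n):
--         return class_map.get(n, 'unknown')
--
--     # Recursive head-extraction: take the first class name, drop every later
--     # number mapping to it, recurse on the rest.  Depth is bounded by the
--     # number of distinct class names (at most 9), so recursion is safe.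
--     def build(ms):
--         if not ms:
--             return []
--         head = name(ms[0])
--         return [head] + build([m for m in ms[1:] if name(m) != head])
--
--     return ', '.join(build(numbers))
-- ===== Notes on version B (the rewrite author's own statement) =====
-- stated objective: alternative
-- what changed: Replaces A's single forward loop with a seen-set and append accumulator by a recursive head-extraction dedup: take the first element's class name, filter every later number mapping to that name out of the rest, and recurse (no seen set and no membership test anywhere).
import Mathlib
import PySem

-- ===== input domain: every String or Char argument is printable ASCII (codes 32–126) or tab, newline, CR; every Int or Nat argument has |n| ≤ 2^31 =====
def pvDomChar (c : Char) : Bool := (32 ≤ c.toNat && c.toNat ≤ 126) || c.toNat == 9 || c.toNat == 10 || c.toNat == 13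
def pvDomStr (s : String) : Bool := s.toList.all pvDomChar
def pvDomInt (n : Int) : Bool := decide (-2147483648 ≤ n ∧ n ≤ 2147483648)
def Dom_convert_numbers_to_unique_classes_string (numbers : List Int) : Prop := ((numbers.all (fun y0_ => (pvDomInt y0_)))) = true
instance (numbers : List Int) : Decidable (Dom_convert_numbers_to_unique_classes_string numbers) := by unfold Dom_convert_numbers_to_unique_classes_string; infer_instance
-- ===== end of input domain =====

-- B replaces A's single seen-set loop by recursive head-extraction: take the first class
-- name, filter out every later number mapping to it, recurse (alternative decomposition).

-- the class_map dict, module-level constant of both sources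
def pvClassMap : PySem.Dict Int String :=
  PySem.Dict.ofList [(0, "pedestrian"), (1, "rider"), (2, "car"), (3, "bus"),
                     (4, "truck"), (5, "bicycle"), (6, "motorcycle"), (7, "train")]

-- ===== PORT A =====
def convert_numbers_to_unique_classes_string (numbers : List Int) : String :=
  let st := numbers.foldl
    (fun (st : PySem.Set String × List String) number =>
      let class_name := PySem.Dict.getD pvClassMap number "unknown"
      if PySem.Set.contains st.1 class_name then st
      else (PySem.Set.add st.1 class_name, st.2 ++ [class_name]))
    (PySem.Set.empty, [])
  PySem.Str.join ", " st.2

-- ===== PORT B =====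
-- B's helper `name`
def pvName (n : Int) : String := PySem.Dict.getD pvClassMap n "unknown"

-- B's helper `build`: head class name, then recurse on the tail with that name filtered out
def pvBuild : List Int → List String
  | [] => []
  | m :: ms =>
    let head := pvName m
    head :: pvBuild (ms.filter (fun x => pvName x ≠ head))
termination_by ms => ms.length
decreasing_by
  have h := List.length_filter_le
    (fun x : {x : Int // x ∈ ms} => !decide (pvName ↑x = pvName m)) ms.attach
  simp only [List.length_attach] at h
  simp
  omega

def convert_numbers_to_unique_classes_string_alt (numbers : List Int) : String :=
  PySem.Str.join ", " (pvBuild numbers)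

-- ===== PRECONDITION & SPEC =====
def Spec_convert_numbers_to_unique_classes_string (numbers : List Int) (out : String) : Prop := out = convert_numbers_to_unique_classes_string_alt numbers
instance (numbers : List Int) (out : String) : Decidable (Spec_convert_numbers_to_unique_classes_string numbers out) := by unfold Spec_convert_numbers_to_unique_classes_string; infer_instance

-- ===== CLAIM =====
def Claim_equal_convert_numbers_to_unique_classes_string : Prop := ∀ (numbers : List Int), Dom_convert_numbers_to_unique_classes_string numbers → Spec_convert_numbers_to_unique_classes_string numbers (convert_numbers_to_unique_classes_string numbers)

-- ===== LEMMAS AND PROOFS =====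

-- A's loop keeps the seen set equal (as a list) to the accumulated unique_classes list,
-- and both equal Set.update of the mapped prefix.
theorem pvLoopA (l : List Int) (u : List String) :
    (l.foldl
      (fun (st : PySem.Set String × List String) number =>
        let class_name := PySem.Dict.getD pvClassMap number "unknown"
        if PySem.Set.contains st.1 class_name then st
        else (PySem.Set.add st.1 class_name, st.2 ++ [class_name]))
      (u, u)) =
      (PySem.Set.update u (l.map pvName), PySem.Set.update u (l.map pvName)) := by
  induction l generalizing u with
  | nil => simp [PySem.Set.update]
  | cons m l ih =>
    have hstep :
        (if PySem.Set.contains u (PySem.Dict.getD pvClassMap m "unknown") then (u, u)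
         else (PySem.Set.add u (PySem.Dict.getD pvClassMap m "unknown"),
               u ++ [PySem.Dict.getD pvClassMap m "unknown"])) =
        (PySem.Set.add u (pvName m), PySem.Set.add u (pvName m)) := by
      by_cases h : PySem.Dict.getD pvClassMap m "unknown" ∈ u <;>
        simp [PySem.Set.add, PySem.Set.contains, pvName, h]
    simp only [List.foldl_cons, List.map_cons]
    rw [hstep, ih]
    simp [PySem.Set.update]

-- folding Set.add ignores elements already in the set: filtering them out changes nothing
theorem pvFoldAdd_filter {α : Type} [DecidableEq α] (xs : List α) (s : PySem.Set α) (x : α)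
    (hx : x ∈ s) :
    List.foldl PySem.Set.add s (xs.filter (· ≠ x)) = List.foldl PySem.Set.add s xs := by
  induction xs generalizing s with
  | nil => rfl
  | cons y ys ih =>
    by_cases h : y = x
    · subst h
      have hadd : PySem.Set.add s y = s := by simp [PySem.Set.add, PySem.Set.contains, hx]
      simpa [hadd] using ih s hx
    · have hx' : x ∈ PySem.Set.add s y := by
        simp [PySem.Set.add]; split_ifs <;> simp [hx]
      simpa [h] using ih (PySem.Set.add s y) hx'

-- a head element absent from everything folded later stays in front
theorem pvFoldAdd_cons {α : Type} [DecidableEq α] (xs : List α) (s : List α) (x : α)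
    (h : ∀ y ∈ xs, y ≠ x) :
    List.foldl PySem.Set.add (x :: s) xs = x :: List.foldl PySem.Set.add s xs := by
  induction xs generalizing s with
  | nil => rfl
  | cons y ys ih =>
    have hy : y ≠ x := h y (by simp)
    have hstep : PySem.Set.add (x :: s) y = x :: PySem.Set.add s y := by
      simp [PySem.Set.add, PySem.Set.contains, hy]
      split_ifs <;> simp
    simp only [List.foldl_cons, hstep]
    exact ih _ (fun z hz => h z (by simp [hz]))

-- Python's order-preserving dedup takes the head, then dedups the tail with the head removed
theorem pvDedup_cons_filter {α : Type} [DecidableEq α] (x : α) (xs : List α) :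
    PySem.List.dedup (x :: xs) = x :: PySem.List.dedup (xs.filter (· ≠ x)) := by
  have h0 : PySem.List.dedup (x :: xs) = List.foldl PySem.Set.add [x] xs := by
    simp [PySem.List.dedup_eq_ofList, PySem.Set.ofList_eq_foldl, PySem.Set.add,
      PySem.Set.contains]
  rw [h0, ← pvFoldAdd_filter xs [x] x (by simp),
    pvFoldAdd_cons _ _ _ (fun y hy => of_decide_eq_true (List.mem_filter.mp hy).2)]
  simp [PySem.List.dedup_eq_ofList, PySem.Set.ofList_eq_foldl]

-- B's recursion computes exactly the order-preserving dedup of the mapped list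
theorem pvBuild_eq_aux : ∀ (n : Nat) (ms : List Int), ms.length ≤ n →
    pvBuild ms = PySem.List.dedup (ms.map pvName) := by
  intro n
  induction n with
  | zero =>
    intro ms h
    have : ms = [] := List.eq_nil_of_length_eq_zero (Nat.le_zero.mp h)
    subst this
    rw [pvBuild.eq_def]
    simp [PySem.List.dedup_eq_ofList, PySem.Set.ofList_eq_foldl]
  | succ n ih =>
    intro ms h
    match ms with
    | [] =>
      rw [pvBuild.eq_def]
      simp [PySem.List.dedup_eq_ofList, PySem.Set.ofList_eq_foldl]
    | m :: ms' =>
      have hlen : (ms'.filter (fun x => pvName x ≠ pvName m)).length ≤ n :=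
        le_trans (List.length_filter_le _ _) (Nat.le_of_succ_le_succ h)
      have hmap : (ms'.filter (fun x => pvName x ≠ pvName m)).map pvName
          = (ms'.map pvName).filter (· ≠ pvName m) := by
        simp only [List.filter_map]; rfl
      rw [List.map_cons, pvDedup_cons_filter, ← hmap, ← ih _ hlen, pvBuild.eq_def]

theorem pvBuild_eq (ms : List Int) : pvBuild ms = PySem.List.dedup (ms.map pvName) :=
  pvBuild_eq_aux ms.length ms le_rfl

-- ===== VERDICT =====
theorem convert_numbers_to_unique_classes_string_spec : Claim_equal_convert_numbers_to_unique_classes_string := by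
  intro numbers _
  unfold Spec_convert_numbers_to_unique_classes_string
      convert_numbers_to_unique_classes_string convert_numbers_to_unique_classes_string_alt
  have := pvLoopA numbers ([] : List String)
  simp only [PySem.Set.empty] at *
  rw [this, pvBuild_eq]
  simp [PySem.Set.update, PySem.List.dedup_eq_ofList, PySem.Set.ofList_eq_foldl]
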